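-- pv_equiv track=rewrite | github.com/codeiain/Aethermoor | frontend/scripts/generate_assets.py | quest_marker
-- ===== SOURCE A (Python) =====
-- T    = (  0,   0,   0,   0)   # transparent
--
-- QUEST_Y = (255, 220,   0, 255)
--
-- def _p(w=16, h=16, base=None):
--     if base is None: base = T
--     return [base] * (w * h)
--
-- def quest_marker(symbol: str) -> list:
--     p = _p()
--     for y in range(16):
--         for x in range(16):
--             if (x-8)**2 + (y-8)**2 < 56: p[y*16+x] = (40, 40, 40, 200)
--     if symbol == '!':
--         for y in range(3, 11): p[y*16+8] = QUEST_Y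
--         p[13*16+8] = QUEST_Y
--     else:
--         for x in range(5, 11): p[3*16+x] = QUEST_Y
--         p[4*16+11] = QUEST_Y; p[5*16+11] = QUEST_Y
--         p[6*16+10] = QUEST_Y; p[7*16+9]  = QUEST_Y
--         p[8*16+8]  = QUEST_Y; p[9*16+8]  = QUEST_Y
--         p[11*16+8] = QUEST_Y
--     return p
-- ===== SOURCE B (Python) =====
-- T = (0, 0, 0, 0)
-- QUEST_Y = (255, 220, 0, 255)
--
-- def quest_marker(symbol: str) -> list:
--     if symbol == '!':
--         sym = {y*16+8 for y in range(3, 11)} | {13*16+8}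
--     else:
--         sym = {3*16+x for x in range(5, 11)} | {4*16+11, 5*16+11, 6*16+10,
--                                                 7*16+9, 8*16+8, 9*16+8, 11*16+8}
--     return [QUEST_Y if i in sym
--             else (40, 40, 40, 200) if (i % 16 - 8)**2 + (i // 16 - 8)**2 < 56
--             else T
--             for i in range(256)]
-- ===== Notes on version B (the rewrite author's own statement) =====
-- stated objective: simpler
-- what changed: B replaces A's mutate-in-place passes (fill circle, then overwrite symbol pixels) by precomputing the symbol pixel index set and building the whole buffer in one priority-ordered comprehension over range(256).
import Mathlib
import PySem

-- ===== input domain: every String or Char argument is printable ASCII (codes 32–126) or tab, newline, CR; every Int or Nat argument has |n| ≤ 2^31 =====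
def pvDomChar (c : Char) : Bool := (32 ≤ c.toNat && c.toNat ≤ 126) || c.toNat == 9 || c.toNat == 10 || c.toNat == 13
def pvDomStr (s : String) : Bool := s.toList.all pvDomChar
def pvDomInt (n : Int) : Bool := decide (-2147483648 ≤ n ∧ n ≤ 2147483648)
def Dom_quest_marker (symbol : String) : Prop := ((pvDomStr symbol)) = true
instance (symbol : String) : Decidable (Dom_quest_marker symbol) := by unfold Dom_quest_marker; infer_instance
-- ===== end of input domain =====

-- ===== PORT A =====
-- B builds the buffer in one pass over a precomputed symbol-index set instead of A's two mutating passes (objective: simpler).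
def questT : Int × Int × Int × Int := (0, 0, 0, 0)
def QUEST_Y : Int × Int × Int × Int := (255, 220, 0, 255)

-- _p(16, 16, None) = [T] * 256
def pvP : List (Int × Int × Int × Int) := List.replicate 256 questT

def quest_marker (symbol : String) : List (Int × Int × Int × Int) :=
  let p := pvP
  let p := (PySem.List.pyRange 0 16 1).foldl (fun p y =>
    (PySem.List.pyRange 0 16 1).foldl (fun p x =>
      if (x - 8) * (x - 8) + (y - 8) * (y - 8) < 56 then p.set (y * 16 + x).toNat (40, 40, 40, 200)
      else p) p) p
  if symbol = "!" then
    let p := (PySem.List.pyRange 3 11 1).foldl (fun p y => p.set (y * 16 + 8).toNat QUEST_Y) p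
    p.set (13 * 16 + 8) QUEST_Y
  else
    let p := (PySem.List.pyRange 5 11 1).foldl (fun p x => p.set (3 * 16 + x).toNat QUEST_Y) p
    let p := p.set (4 * 16 + 11) QUEST_Y
    let p := p.set (5 * 16 + 11) QUEST_Y
    let p := p.set (6 * 16 + 10) QUEST_Y
    let p := p.set (7 * 16 + 9) QUEST_Y
    let p := p.set (8 * 16 + 8) QUEST_Y
    let p := p.set (9 * 16 + 8) QUEST_Y
    p.set (11 * 16 + 8) QUEST_Y


-- ===== PORT B =====
def pvSymIdx (symbol : String) : PySem.Set Int :=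
  if symbol = "!" then
    PySem.Set.ofList ((PySem.List.pyRange 3 11 1).map (fun y => y * 16 + 8) ++ [13 * 16 + 8])
  else
    PySem.Set.ofList ((PySem.List.pyRange 5 11 1).map (fun x => 3 * 16 + x) ++
      [4 * 16 + 11, 5 * 16 + 11, 6 * 16 + 10, 7 * 16 + 9, 8 * 16 + 8, 9 * 16 + 8, 11 * 16 + 8])

def quest_marker_alt (symbol : String) : List (Int × Int × Int × Int) :=
  let sym := pvSymIdx symbol
  (PySem.List.pyRange 0 256 1).map (fun i =>
    if sym.contains i then QUEST_Y
    else if (PySem.Int.mod i 16 - 8) * (PySem.Int.mod i 16 - 8) + (PySem.Int.floordiv i 16 - 8) * (PySem.Int.floordiv i 16 - 8) < 56 then (40, 40, 40, 200)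
    else questT)


-- ===== PRECONDITION & SPEC =====
def Spec_quest_marker (symbol : String) (out : List (Int × Int × Int × Int)) : Prop := out = quest_marker_alt symbol
instance (symbol : String) (out : List (Int × Int × Int × Int)) : Decidable (Spec_quest_marker symbol out) := by unfold Spec_quest_marker; infer_instance

-- ===== CLAIM (what is proved, stated in full; the proofs are below) =====
def Claim_equal_quest_marker : Prop := ∀ (symbol : String), Dom_quest_marker symbol → Spec_quest_marker symbol (quest_marker symbol)

-- ===== LEMMAS AND PROOFS =====

-- ===== VERDICT (by name: the statement is the Claim_ definition above) =====
set_option maxRecDepth 20000 in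
theorem quest_marker_spec : Claim_equal_quest_marker := by
  intro symbol _
  show quest_marker symbol = quest_marker_alt symbol
  by_cases h : symbol = "!"
  · subst h; decide
  · simp only [quest_marker, quest_marker_alt, pvSymIdx, if_neg h]; decide
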